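-- pv_equiv track=rewrite | github.com/kodsnack/advent_of_code_2017 | meldanya-python3/day3/day3.py | squarify
-- ===== SOURCE A (Python) =====
-- def _turn_left(xn, yn):
--     if xn == 0:
--         return (-yn, 0)
--     if yn == 0:
--         return (0, xn)
--     raise Exception('Wrong input')
--
-- def squarify(num):
--     square = {}
--     n = 1
--     x, y = 0, 0
--     xn, yn = 1, 0
--     steps, limit = 0, 1
--     increase = False
--     while n <= num:
--         square[n] = (x, y)
--         x, y = x+xn, y+yn
--         steps += 1
--
--         # Turn?
--         if steps == limit:
--             xn, yn = _turn_left(xn, yn)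
--             steps = 0
--             old_increase = increase
--             increase = True
--             # Increase how many steps on a row?
--             if old_increase:
--                 limit += 1
--                 increase = False
--         n += 1
--
--     return square
-- ===== SOURCE B (Python) =====
-- def _ring(r):
--     # The r-th concentric square ring of the spiral (8*r cells), each side
--     # produced directly from coordinate formulas, counter-clockwise from
--     # the cell just above the ring's entry corner.
--     right = [(r, y) for y in range(1 - r, r + 1)]
--     top = [(x, r) for x in range(r - 1, -r - 1, -1)]
--     left = [(-r, y) for y in range(r - 1, -r - 1, -1)]
--     bottom = [(x, -r) for x in range(1 - r, r + 1)]
--     return right + top + left + bottom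
--
-- def squarify(num):
--     # Stage 1: generate whole rings from closed-form side formulas until
--     # at least num coordinates exist; stage 2: number the first num of them.
--     coords = [(0, 0)]
--     r = 1
--     while len(coords) < num:
--         coords += _ring(r)
--         r += 1
--     return {n: coords[n - 1] for n in range(1, num + 1)}
-- ===== Notes on version B (the rewrite author's own statement) =====
-- stated objective: alternative
-- what changed: Replaces A's single-pass turn-state walk (direction vector mutated by _turn_left plus steps/limit/increase bookkeeping) with two stages: first generate whole concentric square rings, each side as a closed-form coordinate comprehension (no stepping, no direction state), until enough cells exist; then number the first num cells with a dict comprehension.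
import Mathlib
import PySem

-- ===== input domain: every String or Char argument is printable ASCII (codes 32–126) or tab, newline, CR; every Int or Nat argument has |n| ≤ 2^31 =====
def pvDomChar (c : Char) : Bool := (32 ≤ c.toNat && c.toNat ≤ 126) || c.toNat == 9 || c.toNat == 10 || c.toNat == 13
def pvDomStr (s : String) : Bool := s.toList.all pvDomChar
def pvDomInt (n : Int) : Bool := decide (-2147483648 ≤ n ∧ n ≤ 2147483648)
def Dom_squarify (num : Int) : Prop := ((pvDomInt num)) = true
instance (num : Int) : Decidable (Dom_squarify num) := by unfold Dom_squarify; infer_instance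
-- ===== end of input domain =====

-- B replaces A's turn-state spiral walk by two stages: generate whole rings from
-- closed-form side formulas, then number the first num cells (alternative structure, same cost).

-- ===== PORT A =====
-- _turn_left; the final 'raise' branch is unreachable from squarify (one of xn, yn
-- is always 0 there); ported as a junk value never produced in squarify's calls.
def turnLeft (xn yn : Int) : Int × Int :=
  if xn = 0 then (-yn, 0)
  else if yn = 0 then (0, xn)
  else (0, 0)

-- the while-loop of A; fuel = number of remaining iterations (n goes 1..num)
def loopA : Nat → Int → Int → Int → Int → Int → Int → Int → Bool →
    PySem.Dict Int (Int × Int) → PySem.Dict Int (Int × Int)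
  | 0, _, _, _, _, _, _, _, _, sq => sq
  | fuel+1, n, x, y, xn, yn, steps, limit, inc, sq =>
    let sq' := sq.insert n (x, y)
    let x' := x + xn
    let y' := y + yn
    let steps' := steps + 1
    if steps' = limit then
      let p := turnLeft xn yn
      let limit' := if inc then limit + 1 else limit
      loopA fuel (n+1) x' y' p.1 p.2 0 limit' (!inc) sq'
    else
      loopA fuel (n+1) x' y' xn yn steps' limit inc sq'

def squarify (num : Int) : List (Int × Int × Int) :=
  (loopA num.toNat 1 0 0 1 0 0 1 false PySem.Dict.empty).items

-- ===== PORT B =====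
-- _ring(r): the four sides as range comprehensions
def ringB (r : Int) : List (Int × Int) :=
  (PySem.List.pyRange (1 - r) (r + 1) 1).map (fun y => (r, y)) ++
  (PySem.List.pyRange (r - 1) (-r - 1) (-1)).map (fun x => (x, r)) ++
  (PySem.List.pyRange (r - 1) (-r - 1) (-1)).map (fun y => (-r, y)) ++
  (PySem.List.pyRange (1 - r) (r + 1) 1).map (fun x => (x, -r))

-- the while-loop of B; fuel = num.toNat (each pass appends ≥ 8 cells, so it suffices)
def loopB (num : Int) : Nat → Int → List (Int × Int) → List (Int × Int)
  | 0, _, coords => coords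
  | fuel+1, r, coords =>
    if (coords.length : Int) < num then loopB num fuel (r + 1) (coords ++ ringB r)
    else coords

def squarify_alt (num : Int) : List (Int × Int × Int) :=
  let coords := loopB num num.toNat 1 [(0, 0)]
  -- {n: coords[n-1] for n in range(1, num+1)}; the index n-1 is always in range
  ((PySem.List.pyRange 1 (num + 1) 1).foldl
    (fun d n => d.insert n (PySem.List.pyGetD coords (n - 1) (0, 0)))
    PySem.Dict.empty).items

-- ===== PRECONDITION & SPEC =====
def Spec_squarify (num : Int) (out : List (Int × Int × Int)) : Prop := out = squarify_alt num
instance (num : Int) (out : List (Int × Int × Int)) : Decidable (Spec_squarify num out) := by unfold Spec_squarify; infer_instance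

-- ===== CLAIM (what is proved, stated in full; the proofs are below) =====
def Claim_equal_squarify : Prop := ∀ (num : Int), Dom_squarify num → Spec_squarify num (squarify num)

-- ===== LEMMAS AND PROOFS =====

-- A's walk as a pure list of visited coordinates (same stepping as loopA, dict dropped)
def walkA : Nat → Int → Int → Int → Int → Int → Int → Bool → List (Int × Int)
  | 0, _, _, _, _, _, _, _ => []
  | fuel+1, x, y, xn, yn, steps, limit, inc =>
    (x, y) ::
      (if steps + 1 = limit then
        walkA fuel (x+xn) (y+yn) (turnLeft xn yn).1 (turnLeft xn yn).2 0
          (if inc then limit + 1 else limit) (!inc)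
      else
        walkA fuel (x+xn) (y+yn) xn yn (steps+1) limit inc)

-- pair each coordinate with its key n, n+1, ...
def tagFrom (n : Int) : List (Int × Int) → List (Int × Int × Int)
  | [] => []
  | c :: cs => (n, c) :: tagFrom (n+1) cs

-- the coordinates after generating rings 1..R, and their count
def coordsAfter : Nat → List (Int × Int)
  | 0 => [(0, 0)]
  | R+1 => coordsAfter R ++ ringB ((R : Int) + 1)

def lenA : Nat → Nat
  | 0 => 1
  | R+1 => lenA R + 8 * (R + 1)

lemma loopA_eq_foldl (fuel : Nat) : ∀ n x y xn yn steps limit inc sq,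
    loopA fuel n x y xn yn steps limit inc sq =
      (tagFrom n (walkA fuel x y xn yn steps limit inc)).foldl
        (fun d p => d.insert p.1 p.2) sq := by
  induction fuel with
  | zero => intros; rfl
  | succ fuel ih =>
    intro n x y xn yn steps limit inc sq
    simp only [loopA, walkA]
    by_cases h : steps + 1 = limit
    · rw [if_pos h, if_pos h]; simp only [tagFrom, List.foldl_cons]; rw [ih]
    · rw [if_neg h, if_neg h]; simp only [tagFrom, List.foldl_cons]; rw [ih]

lemma tagFrom_keys (l : List (Int × Int)) : ∀ n : Int,
    (tagFrom n l).map Prod.fst = (List.range l.length).map (fun (k : Nat) => n + (k : Int)) := by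
  induction l with
  | nil => intro n; rfl
  | cons c cs ih =>
    intro n
    rw [List.length_cons, List.range_succ_eq_map, List.map_cons, List.map_map]
    simp only [tagFrom, List.map_cons, ih, List.cons_eq_cons]
    refine ⟨by norm_num, ?_⟩
    apply List.map_congr_left; intro k _; simp [Function.comp]; push_cast; ring

lemma tagFrom_eq (l : List (Int × Int)) : ∀ n : Int,
    tagFrom n l = (List.range l.length).map
      (fun (k : Nat) => (n + (k : Int), PySem.List.pyGetD l (k : Int) (0, 0))) := by
  induction l with
  | nil => intro n; rfl
  | cons c cs ih =>
    intro n
    rw [List.length_cons, List.range_succ_eq_map, List.map_cons, List.map_map]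
    simp only [tagFrom, ih, List.cons_eq_cons]
    refine ⟨?_, ?_⟩
    · rw [PySem.List.pyGetD_natCast (c :: cs) 0 (0,0)]; norm_num
    · apply List.map_congr_left
      intro k _
      have h2 : PySem.List.pyGetD (c :: cs) (((k+1 : Nat) : Int)) (0,0)
          = PySem.List.pyGetD cs (k : Int) (0,0) := by
        rw [PySem.List.pyGetD_natCast cs k (0,0), PySem.List.pyGetD_natCast (c :: cs) (k+1) (0,0)]
        rfl
      push_cast at h2
      simp [Function.comp, h2]
      ring

-- a straight run of m steps: positions form an arithmetic progression, then a turn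
lemma walkA_run (m : Nat) : ∀ (x y xn yn limit : Int) (inc : Bool) (f : Nat),
    0 < m → (m : Int) ≤ limit →
    walkA (m + f) x y xn yn (limit - m) limit inc =
      (List.range m).map (fun (i : Nat) => (x + (i : Int) * xn, y + (i : Int) * yn)) ++
      walkA f (x + m * xn) (y + m * yn) (turnLeft xn yn).1 (turnLeft xn yn).2 0
        (if inc then limit + 1 else limit) (!inc) := by
  induction m with
  | zero => intro _ _ _ _ _ _ _ h; omega
  | succ m ih =>
    intro x y xn yn limit inc f _ hle
    rw [Nat.succ_add]
    rcases Nat.eq_zero_or_pos m with hm | hm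
    · subst hm
      simp only [walkA]
      rw [if_pos (by push_cast; ring)]
      simp [List.range_succ]
    · simp only [walkA]
      rw [if_neg (by push_cast; omega)]
      have hst : (limit - (((m:Nat)+1:Nat):Int)) + 1 = limit - (m:Int) := by push_cast; ring
      rw [hst]
      rw [ih (x+xn) (y+yn) xn yn limit inc f hm (by push_cast at hle ⊢; omega)]
      rw [List.range_succ_eq_map, List.map_cons, List.map_map]
      rw [List.cons_append, List.cons_eq_cons]
      refine ⟨by norm_num, ?_⟩
      congr 1
      · apply List.map_congr_left; intro i _; simp [Function.comp]; constructor <;> ring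
      · push_cast; ring_nf

-- one full ring of A's walk, from the ring-start state, is exactly ringB rn
lemma walkA_ring (rn : Nat) (h : 1 ≤ rn) (f : Nat) :
    walkA (8 * rn + f) (rn : Int) (1 - (rn : Int)) 0 1 0 (2 * (rn : Int) - 1) true =
      ringB (rn : Int) ++
      walkA f ((rn : Int) + 1) (-(rn : Int)) 0 1 0 (2 * (rn : Int) + 1) true := by
  have hfuel : 8 * rn + f = (2*rn-1) + ((2*rn) + ((2*rn) + ((2*rn+1) + f))) := by omega
  rw [hfuel]
  have run1 := walkA_run (2*rn-1) (rn : Int) (1-(rn:Int)) 0 1 (2*(rn:Int)-1) true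
    ((2*rn) + ((2*rn) + ((2*rn+1) + f))) (by omega) (by push_cast [Nat.cast_sub (by omega : 1 ≤ 2*rn)]; omega)
  simp only [show 2*(rn:Int)-1 - ((2*rn-1 : Nat):Int) = 0 from by
      push_cast [Nat.cast_sub (by omega : 1 ≤ 2*rn)]; ring] at run1
  norm_num [turnLeft] at run1
  rw [run1]
  have run2 := walkA_run (2*rn) ((rn:Int)) (1-(rn:Int)+((2*rn-1:Nat):Int)) (-1) 0 (2*(rn:Int)) false
    ((2*rn) + ((2*rn+1) + f)) (by omega) (by push_cast; omega)
  simp only [show 2*(rn:Int) - ((2*rn : Nat):Int) = 0 from by push_cast; ring] at run2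
  norm_num [turnLeft] at run2
  rw [run2]
  have run3 := walkA_run (2*rn) ((rn:Int) + -(2*(rn:Int))) (1-(rn:Int)+((2*rn-1:Nat):Int)) 0 (-1) (2*(rn:Int)) true
    ((2*rn+1) + f) (by omega) (by push_cast; omega)
  simp only [show 2*(rn:Int) - ((2*rn : Nat):Int) = 0 from by push_cast; ring] at run3
  norm_num [turnLeft] at run3
  rw [run3]
  have run4 := walkA_run (2*rn+1) ((rn:Int) + -(2*(rn:Int))) (1-(rn:Int)+((2*rn-1:Nat):Int) + -(2*(rn:Int))) 1 0 (2*(rn:Int)+1) false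
    f (by omega) (by push_cast; omega)
  simp only [show 2*(rn:Int)+1 - ((2*rn+1 : Nat):Int) = 0 from by push_cast; ring] at run4
  norm_num [turnLeft] at run4
  rw [run4]
  simp only [show ((2*rn-1:Nat):Int) = 2*(rn:Int)-1 from by
    push_cast [Nat.cast_sub (by omega : 1 ≤ 2*rn)]; ring]
  ring_nf
  simp only [← List.append_assoc]
  congr 1
  have h2 : ((rn:Int)+1 - (1-(rn:Int))).toNat = rn*2 := by omega
  have h3 : (((rn:Int)-1) - (-(rn:Int)-1)).toNat = rn*2 := by omega
  apply List.ext_getElem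
  · simp [ringB, PySem.List.pyRange_one, PySem.List.pyRange_neg_one, h2]
    omega
  · intro j hj1 hj2
    simp only [ringB, PySem.List.pyRange_one, PySem.List.pyRange_neg_one, h2, h3,
      List.map_map, List.getElem_append, List.getElem_map, List.getElem_range,
      List.length_append, List.length_map, List.length_range, Function.comp] at hj1 hj2 ⊢
    split_ifs <;> simp only [Prod.mk.injEq] <;> constructor <;> first | omega | trivial

lemma walkA_init (R : Nat) : ∀ f : Nat,
    walkA (lenA R + f) 0 0 1 0 0 1 false =
      coordsAfter R ++
      walkA f ((R : Int) + 1) (-(R : Int)) 0 1 0 (2 * (R : Int) + 1) true := by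
  induction R with
  | zero =>
    intro f
    show walkA (1 + f) 0 0 1 0 0 1 false = _
    rw [Nat.add_comm 1 f]
    simp [walkA, turnLeft, coordsAfter]
  | succ R ih =>
    intro f
    rw [show lenA (R+1) + f = lenA R + (8*(R+1) + f) from by simp [lenA]; omega]
    rw [ih (8*(R+1) + f)]
    have hr := walkA_ring (R+1) (by omega) f
    push_cast at hr ⊢
    rw [show (1:Int) - ((R:Int)+1) = -(R:Int) from by ring,
      show (2:Int)*((R:Int)+1)-1 = 2*(R:Int)+1 from by ring] at hr
    rw [hr, coordsAfter, List.append_assoc]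

lemma length_ringB (rn : Nat) : (ringB (rn : Int)).length = 8 * rn := by
  simp [ringB, PySem.List.length_pyRange_one, PySem.List.length_pyRange_neg_one]
  omega

lemma length_coordsAfter (R : Nat) : (coordsAfter R).length = lenA R := by
  induction R with
  | zero => rfl
  | succ R ih =>
    rw [coordsAfter, List.length_append, ih, lenA]
    have := length_ringB (R+1)
    push_cast at this
    rw [this]

lemma loopB_eq (num : Int) : ∀ (f R : Nat), num ≤ (lenA R : Int) + (f : Int) →
    ∃ R', R ≤ R' ∧ loopB num f ((R : Int) + 1) (coordsAfter R) = coordsAfter R' ∧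
      num ≤ (lenA R' : Int) := by
  intro f
  induction f with
  | zero => intro R h; exact ⟨R, le_refl _, rfl, by push_cast at h; omega⟩
  | succ f ih =>
    intro R h
    rw [loopB]
    by_cases hc : ((coordsAfter R).length : Int) < num
    · rw [if_pos hc]
      have hstep : coordsAfter R ++ ringB ((R:Int)+1) = coordsAfter (R+1) := rfl
      have harg : (R:Int) + 1 + 1 = ((R+1 : Nat) : Int) + 1 := by push_cast; ring
      rw [hstep, harg]
      obtain ⟨R', h1, h2, h3⟩ := ih (R+1) (by
        have : lenA (R+1) = lenA R + 8*(R+1) := rfl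
        push_cast [this] at h ⊢; omega)
      exact ⟨R', by omega, h2, h3⟩
    · rw [if_neg hc]
      refine ⟨R, le_refl _, rfl, ?_⟩
      rw [length_coordsAfter] at hc
      omega

lemma walkA_take (m : Nat) : ∀ (f : Nat) x y xn yn steps limit inc, m ≤ f →
    (walkA f x y xn yn steps limit inc).take m = walkA m x y xn yn steps limit inc := by
  induction m with
  | zero => intros; rfl
  | succ m ih =>
    intro f x y xn yn steps limit inc h
    obtain ⟨f', rfl⟩ : ∃ f', f = f' + 1 := ⟨f - 1, by omega⟩
    simp only [walkA, List.take_succ_cons]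
    by_cases hc : steps + 1 = limit
    · rw [if_pos hc, if_pos hc, ih _ _ _ _ _ _ _ _ (by omega)]
    · rw [if_neg hc, if_neg hc, ih _ _ _ _ _ _ _ _ (by omega)]

lemma squarify_eq_alt (num : Int) : squarify num = squarify_alt num := by
  unfold squarify squarify_alt
  rw [loopA_eq_foldl]
  rw [PySem.Dict.items_foldl_insert_fresh _ Prod.fst Prod.snd _
    (by intro a _; simp [pysem])
    (by rw [tagFrom_keys]
        exact List.nodup_range.map (fun a b h => by omega))]
  rw [PySem.Dict.items_foldl_insert_fresh _ (fun n => n)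
      (fun n => PySem.List.pyGetD (loopB num num.toNat 1 [(0, 0)]) (n - 1) (0, 0)) _
    (by intro a _; simp [pysem])
    (by simp only [List.map_id']; exact PySem.List.nodup_pyRange_one 1 (num+1))]
  congr 1
  obtain ⟨R', hR0, hcoords, hlen⟩ := loopB_eq num num.toNat 0
    (by simp only [lenA]; push_cast; omega)
  simp only [Nat.cast_zero, zero_add] at hcoords
  have hc0 : coordsAfter 0 = [(0, 0)] := rfl
  rw [hc0] at hcoords
  rw [hcoords]
  have hmle : num.toNat ≤ lenA R' := by omega
  have hwalk : walkA num.toNat 0 0 1 0 0 1 false = (coordsAfter R').take num.toNat := by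
    have hinit := walkA_init R' 0
    rw [Nat.add_zero] at hinit
    simp only [walkA, List.append_nil] at hinit
    rw [← hinit, walkA_take num.toNat (lenA R') 0 0 1 0 0 1 false hmle]
  rw [hwalk, tagFrom_eq, List.length_take, length_coordsAfter, min_eq_left hmle]
  rw [PySem.List.pyRange_one 1 (num+1), List.map_map]
  rw [show (num+1-1 : Int) = num from by ring]
  simp only [List.map_map, Function.comp, Prod.mk.eta]
  apply List.map_congr_left
  intro k hk
  simp only [Function.comp, List.mem_range] at hk ⊢
  have hidx : (1 : Int) + (k : Int) - 1 = (k : Int) := by ring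
  rw [hidx, PySem.List.pyGetD_natCast, PySem.List.pyGetD_natCast]
  simp [List.getD_eq_getElem?_getD, hk]

-- ===== VERDICT (by name: the statement is the Claim_ definition above) =====
theorem squarify_spec : Claim_equal_squarify := by
  intro num _
  unfold Spec_squarify
  exact squarify_eq_alt num
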